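-- pv_equiv track=rewrite | github.com/Danspb77/Algorithms- | Tinkoff/first_task.py | can_form_tinkoff
-- ===== SOURCE A (Python) =====
-- def can_form_tinkoff(s):
--     flag=False
--     if len(s)==7:
--         flag=True
--     # Создаем словарь, чтобы отслеживать количество каждой буквы в строке
--     char_count = {}
--     for char in s:
--         char_count[char] = char_count.get(char, 0) + 1
--
--     # Проверяем, что в строке есть не меньше букв для слова "TINKOFF"
--     p = all(char_count.get(letter, 0) >= "TINKOFF".count(letter) for letter in "TINKOFF")
--
--     if p and flag:
--         return "Yes"
--     else:
--         return "No"
-- ===== SOURCE B (Python) =====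
-- def can_form_tinkoff(s):
--     return "Yes" if sorted(s) == sorted("TINKOFF") else "No"
-- ===== Notes on version B (the rewrite author's own statement) =====
-- stated objective: simpler
-- what changed: Replaces the frequency-dict build plus per-letter count checks (with a separate length flag) by a single anagram test: sorted(s) == sorted('TINKOFF'), exploiting that length 7 plus sufficient counts of each TINKOFF letter is exactly being a permutation of 'TINKOFF'.
import Mathlib
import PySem

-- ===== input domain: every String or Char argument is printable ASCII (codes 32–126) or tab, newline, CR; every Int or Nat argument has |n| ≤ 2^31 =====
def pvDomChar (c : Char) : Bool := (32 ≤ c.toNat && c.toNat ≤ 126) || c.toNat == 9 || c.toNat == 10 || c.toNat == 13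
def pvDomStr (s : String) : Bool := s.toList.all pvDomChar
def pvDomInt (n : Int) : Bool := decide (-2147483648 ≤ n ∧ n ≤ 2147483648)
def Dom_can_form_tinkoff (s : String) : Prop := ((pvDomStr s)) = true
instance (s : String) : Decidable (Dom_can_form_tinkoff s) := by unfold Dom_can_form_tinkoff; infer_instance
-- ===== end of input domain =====

-- B replaces A's frequency-dict-plus-length check by a single sorted-anagram comparison (simpler).


-- ===== PORT A =====
def can_form_tinkoff (s : String) : String :=
  -- flag = False; if len(s) == 7: flag = True
  let flag : Bool := PySem.Str.len s == 7
  -- char_count = {}; for char in s: char_count[char] = char_count.get(char, 0) + 1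
  let char_count : PySem.Dict Char Int :=
    s.toList.foldl (fun d c => d.insert c (d.getD c 0 + 1)) PySem.Dict.empty
  -- p = all(char_count.get(letter, 0) >= "TINKOFF".count(letter) for letter in "TINKOFF")
  let p : Bool :=
    ("TINKOFF".toList).all (fun letter =>
      decide (("TINKOFF".toList.count letter : Int) ≤ char_count.getD letter 0))
  if p && flag then "Yes" else "No"

-- ===== PORT B =====
def can_form_tinkoff_alt (s : String) : String :=
  if PySem.List.sorted s.toList (fun x => x) == PySem.List.sorted "TINKOFF".toList (fun x => x)
  then "Yes" else "No"

-- ===== PRECONDITION & SPEC =====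
def Spec_can_form_tinkoff (s : String) (out : String) : Prop := out = can_form_tinkoff_alt s
instance (s : String) (out : String) : Decidable (Spec_can_form_tinkoff s out) := by unfold Spec_can_form_tinkoff; infer_instance

-- ===== CLAIM (what is proved, stated in full; the proofs are below) =====
def Claim_equal_can_form_tinkoff : Prop := ∀ (s : String), Dom_can_form_tinkoff s → Spec_can_form_tinkoff s (can_form_tinkoff s)

-- ===== LEMMAS AND PROOFS =====

-- A's accepting condition (counts sufficient for each TINKOFF letter, length 7) holds
-- exactly when the character list is a permutation of "TINKOFF".toList.
theorem pv_cond_iff_perm (l : List Char) :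
    ((∀ c ∈ "TINKOFF".toList, ("TINKOFF".toList.count c : Int) ≤ (l.count c : Int)) ∧ l.length = 7)
      ↔ l.Perm "TINKOFF".toList := by
  constructor
  · rintro ⟨hc, hlen⟩
    have hsub : "TINKOFF".toList.Subperm l := by
      rw [List.subperm_ext_iff]
      intro c hcmem
      exact_mod_cast hc c hcmem
    have hlen' : l.length ≤ "TINKOFF".toList.length := by
      simp [hlen]
    exact (hsub.perm_of_length_le hlen').symm
  · intro hp
    refine ⟨fun c _ => by rw [hp.count_eq], by rw [hp.length_eq]; decide⟩

theorem can_form_tinkoff_eq_alt (s : String) :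
    can_form_tinkoff s = can_form_tinkoff_alt s := by
  have hA : (("TINKOFF".toList).all (fun letter =>
        decide (("TINKOFF".toList.count letter : Int) ≤
          (s.toList.foldl (fun d c => d.insert c (d.getD c 0 + 1)) PySem.Dict.empty).getD letter 0))
        && (PySem.Str.len s == 7)) = true
      ↔ s.toList.Perm "TINKOFF".toList := by
    rw [← pv_cond_iff_perm s.toList]
    simp [PySem.Dict.getD_foldl_insert_add_one, PySem.Str.len_eq]
    intros; omega
  have hB : (PySem.List.sorted s.toList (fun x => x) == PySem.List.sorted "TINKOFF".toList (fun x => x)) = true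
      ↔ s.toList.Perm "TINKOFF".toList := by
    rw [beq_iff_eq]
    exact PySem.List.sorted_id_eq_sorted_id_iff_perm s.toList "TINKOFF".toList
  simp only [can_form_tinkoff, can_form_tinkoff_alt]
  split_ifs with h1 h2 h2
  · rfl
  · exact absurd (hB.mpr (hA.mp h1)) h2
  · exact absurd (hA.mpr (hB.mp h2)) h1
  · rfl

-- ===== VERDICT (by name: the statement is the Claim_ definition above) =====
theorem can_form_tinkoff_spec : Claim_equal_can_form_tinkoff := by
  intro s _
  unfold Spec_can_form_tinkoff
  exact can_form_tinkoff_eq_alt s
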